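-- pv_equiv track=rewrite | github.com/b-simjoo/check-mate | Solutions/Student (7).py | dignoal_point
-- ===== SOURCE A (Python) =====
-- def dignoal_point(row,col):
--     if row<=col:
--         i=0
--         j=col-row
--         i1=0
--         j1=col+row
--     if row>col:
--         i=row-col
--         j=0
--         i1=0
--         j1=row+col
--     if j1>=8:
--         while j1>7:
--             j1-=1
--             i1+=1
--     return(i,j,i1,j1)
-- ===== SOURCE B (Python) =====
-- def dignoal_point(row, col):
--     i = max(0, row - col)
--     j = max(0, col - row)
--     s = row + col
--     if s >= 8:
--         return (i, j, s - 7, 7)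
--     return (i, j, 0, s)
-- ===== Notes on version B (the rewrite author's own statement) =====
-- stated objective: simpler
-- what changed: The branch pair is folded into max() expressions and the decrement-while normalization loop is replaced by its closed form (s-7, 7), removing all iteration.
import Mathlib
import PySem

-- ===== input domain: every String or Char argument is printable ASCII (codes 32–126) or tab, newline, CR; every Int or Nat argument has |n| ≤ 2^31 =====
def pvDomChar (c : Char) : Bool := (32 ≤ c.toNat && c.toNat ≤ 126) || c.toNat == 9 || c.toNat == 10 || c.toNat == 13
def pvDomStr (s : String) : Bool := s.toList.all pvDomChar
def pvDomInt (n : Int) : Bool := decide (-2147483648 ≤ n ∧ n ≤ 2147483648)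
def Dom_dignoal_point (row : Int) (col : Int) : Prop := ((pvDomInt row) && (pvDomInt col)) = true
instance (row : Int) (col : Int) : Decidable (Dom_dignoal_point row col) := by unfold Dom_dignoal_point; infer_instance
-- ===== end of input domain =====

-- ===== PORT A =====
-- while j1>7: j1-=1; i1+=1   (literal loop, structural recursion on (j1-7).toNat)
def pvALoop (i1 j1 : Int) : Int × Int :=
  if h : j1 > 7 then pvALoop (i1 + 1) (j1 - 1) else (i1, j1)
termination_by (j1 - 7).toNat
decreasing_by omega

def dignoal_point (row : Int) (col : Int) : Int × Int × Int × Int :=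
  let (i, j, i1, j1) :=
    if row ≤ col then ((0 : Int), col - row, (0 : Int), col + row)
    else (row - col, (0 : Int), (0 : Int), row + col)
  let (i1, j1) := if j1 ≥ 8 then pvALoop i1 j1 else (i1, j1)
  (i, j, i1, j1)

-- ===== PORT B =====
def dignoal_point_alt (row : Int) (col : Int) : Int × Int × Int × Int :=
  let i := max 0 (row - col)
  let j := max 0 (col - row)
  let s := row + col
  if s ≥ 8 then (i, j, s - 7, 7) else (i, j, 0, s)

-- ===== PRECONDITION & SPEC =====
def Spec_dignoal_point (row : Int) (col : Int) (out : Int × Int × Int × Int) : Prop := out = dignoal_point_alt row col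
instance (row : Int) (col : Int) (out : Int × Int × Int × Int) : Decidable (Spec_dignoal_point row col out) := by unfold Spec_dignoal_point; infer_instance

-- ===== CLAIM (what is proved, stated in full; the proofs are below) =====
def Claim_equal_dignoal_point : Prop := ∀ (row : Int) (col : Int), Dom_dignoal_point row col → Spec_dignoal_point row col (dignoal_point row col)

-- ===== LEMMAS AND PROOFS =====

-- ===== VERDICT (by name: the statement is the Claim_ definition above) =====
theorem pvALoop_eq (i1 j1 : Int) :
    pvALoop i1 j1 = if j1 > 7 then (i1 + (j1 - 7), 7) else (i1, j1) := by
  induction i1, j1 using pvALoop.induct with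
  | case1 i1 j1 h ih =>
      rw [pvALoop, dif_pos h, ih]
      split_ifs <;> simp_all <;> omega
  | case2 i1 j1 h =>
      rw [pvALoop, dif_neg h, if_neg h]

theorem dignoal_point_spec : Claim_equal_dignoal_point := by
  intro row col _
  unfold Spec_dignoal_point dignoal_point dignoal_point_alt
  by_cases hrc : row ≤ col <;> simp only [hrc, if_pos] <;>
    split_ifs <;> simp_all [pvALoop_eq, Prod.ext_iff, max_def] <;> (try split_ifs) <;> omega
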